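-- pv_equiv track=rewrite | github.com/ndombrowski20/pdes_python | NMP/CF_1.py | big_matrix
-- ===== SOURCE A (Python) =====
-- def big_matrix(xlist):
--     A = []
--     for i in range(len(xlist)):
--         ai = []
--         for j in range(len(xlist)):
--             if i == 0 and j == 0:
--                 ai.append(len(xlist))
--             else:
--                 sum_all = 0
--                 for num in xlist:
--                     sum_all += num**(i+j)
--                 ai.append(sum_all)
--         A.append(ai)
--     return A
-- ===== SOURCE B (Python) =====
-- def big_matrix(xlist):
--     n = len(xlist)
--     S = [sum(num ** k for num in xlist) for k in range(2 * n - 1)]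
--     return [[S[i + j] for j in range(n)] for i in range(n)]
-- ===== Notes on version B (the rewrite author's own statement) =====
-- stated objective: faster
-- what changed: Precompute the 2n-1 power sums S[k]=sum(num**k) once and fill A[i][j]=S[i+j], replacing the innermost per-cell summation loop (A's special case A[0][0]=n equals S[0] anyway).
import Mathlib
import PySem

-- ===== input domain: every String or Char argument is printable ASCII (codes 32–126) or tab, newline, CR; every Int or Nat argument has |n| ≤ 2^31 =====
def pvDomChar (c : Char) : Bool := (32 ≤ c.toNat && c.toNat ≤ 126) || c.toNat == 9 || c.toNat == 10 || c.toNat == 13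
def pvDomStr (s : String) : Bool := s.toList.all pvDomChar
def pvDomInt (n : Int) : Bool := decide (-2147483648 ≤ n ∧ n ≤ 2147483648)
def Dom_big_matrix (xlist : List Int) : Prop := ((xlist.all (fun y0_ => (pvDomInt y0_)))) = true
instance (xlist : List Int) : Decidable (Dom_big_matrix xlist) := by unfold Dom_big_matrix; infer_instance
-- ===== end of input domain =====

-- B precomputes the 2n-1 power sums S[k] once and fills A[i][j] = S[i+j], removing A's innermost per-cell summation loop.

-- ===== PORT A =====
def big_matrix (xlist : List Int) : List (List Int) :=
  (PySem.List.pyRange 0 (xlist.length : Int) 1).foldl (fun A i =>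
    A ++ [(PySem.List.pyRange 0 (xlist.length : Int) 1).foldl (fun ai j =>
      if i = 0 ∧ j = 0 then ai ++ [(xlist.length : Int)]
      else ai ++ [xlist.foldl (fun sum_all num => sum_all + num ^ (i + j).toNat) 0]) []]) []

-- ===== PORT B =====
def big_matrix_alt (xlist : List Int) : List (List Int) :=
  let n := xlist.length
  let S := (List.range (2 * n - 1)).map (fun k => (xlist.map (fun num => num ^ k)).sum)
  (List.range n).map (fun i => (List.range n).map (fun j => S.getD (i + j) 0))

-- ===== PRECONDITION & SPEC =====
def Spec_big_matrix (xlist : List Int) (out : List (List Int)) : Prop := out = big_matrix_alt xlist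
instance (xlist : List Int) (out : List (List Int)) : Decidable (Spec_big_matrix xlist out) := by unfold Spec_big_matrix; infer_instance

-- ===== CLAIM (what is proved, stated in full; the proofs are below) =====
def Claim_equal_big_matrix : Prop := ∀ (xlist : List Int), Dom_big_matrix xlist → Spec_big_matrix xlist (big_matrix xlist)

-- ===== LEMMAS AND PROOFS =====

-- A's append-in-branch loop body is an append of a conditional element, so the fold is a map.
theorem foldl_ite_append {α : Type} (p : Int → Prop) [DecidablePred p] (f g : Int → α) (l : List Int) (acc : List α) :
    l.foldl (fun ai j => if p j then ai ++ [f j] else ai ++ [g j]) acc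
      = acc ++ l.map (fun j => if p j then f j else g j) := by
  have h : (fun (ai : List α) j => if p j then ai ++ [f j] else ai ++ [g j])
      = fun (ai : List α) j => ai ++ [if p j then f j else g j] := by
    funext ai j; split_ifs <;> rfl
  rw [h, PySem.List.foldl_append_singleton_eq_map]

-- A's cell (i,j) — including its i=j=0 special case, which equals S[0] = n — is B's S[i+j].
theorem cell_eq (xlist : List Int) (i j : Nat) (hi : i < xlist.length) (hj : j < xlist.length) :
    (if (i : Int) = 0 ∧ (j : Int) = 0 then (xlist.length : Int)
     else xlist.foldl (fun sum_all num => sum_all + num ^ (((i : Int)) + ((j : Int))).toNat) 0)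
    = ((List.range (2 * xlist.length - 1)).map (fun k => (xlist.map (fun num => num ^ k)).sum)).getD (i + j) 0 := by
  rw [PySem.List.getD_map_range _ _ _ _ (by omega)]
  have ht : (((i : Int)) + ((j : Int))).toNat = i + j := by omega
  rw [ht]
  by_cases hij : (i : Int) = 0 ∧ (j : Int) = 0
  · have hi0 : i = 0 := by exact_mod_cast hij.1
    have hj0 : j = 0 := by exact_mod_cast hij.2
    subst hi0; subst hj0
    simp
  · rw [if_neg hij]
    simpa using PySem.List.foldl_add xlist (fun num => num ^ (i + j)) 0

-- ===== VERDICT (by name: the statement is the Claim_ definition above) =====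
theorem big_matrix_spec : Claim_equal_big_matrix := by
  intro xlist _
  unfold Spec_big_matrix big_matrix big_matrix_alt
  rw [PySem.List.pyRange_zero_nat]
  rw [PySem.List.foldl_append_singleton_eq_map]
  simp only [List.nil_append, List.map_map]
  apply List.map_congr_left
  intro i hi
  simp only [Function.comp]
  rw [foldl_ite_append (fun j => (i : Int) = 0 ∧ j = 0)]
  simp only [List.nil_append, List.map_map]
  apply List.map_congr_left
  intro j hj
  simp only [Function.comp]
  exact cell_eq xlist i j (List.mem_range.mp hi) (List.mem_range.mp hj)
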